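-- pv_equiv track=rewrite | github.com/YAGAMI55/Noesis_Plugin_src | fmt_io_X360_SWIZZ_Texture2D.py | getWidthHeight
-- ===== SOURCE A (Python) =====
-- import math
--
-- widthList = (2,4,8,16,32,64,128,256,512,1024,2048)
--
-- def getWidthHeight(buffSize):
--     tWidth = int(math.sqrt(buffSize * 2))
--     if tWidth not in widthList:
--         sizeList = []
--         for i in range(len(widthList)):
--             index = len(widthList) - 1 - i
--             tWidth = widthList[index]
--             for j in range(len(widthList)):
--                 tHeight = widthList[j]
--                 size = tWidth * tHeight // 2
--                 sizeList.append((size,tWidth,tHeight))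
--         for i in range(len(sizeList)):
--             info = sizeList[i]
--             if info[0] == buffSize:
--                 width = info[1]
--                 height = info[2]
--                 if (width // height) == 2 or (height // width) == 2:
--                     return (info[1],info[2])
--
--
--     return (tWidth,tWidth)
-- ===== SOURCE B (Python) =====
-- import math
--
-- widthList = (2,4,8,16,32,64,128,256,512,1024,2048)
--
-- def getWidthHeight(buffSize):
--     tWidth = int(math.sqrt(buffSize * 2))
--     if tWidth in widthList:
--         return (tWidth, tWidth)
--     q = int(math.sqrt(buffSize))
--     if q * q == buffSize and q in widthList and 2 * q in widthList:
--         return (2 * q, q)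
--     return (2, 2)
-- ===== Notes on version B (the rewrite author's own statement) =====
-- stated objective: simpler
-- what changed: B drops A's exhaustive width-by-height size-table build and linear scan, using instead that every two-to-one-ratio table entry has size equal to the square of its smaller dimension: a perfect-square test plus two membership checks.
import Mathlib
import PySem

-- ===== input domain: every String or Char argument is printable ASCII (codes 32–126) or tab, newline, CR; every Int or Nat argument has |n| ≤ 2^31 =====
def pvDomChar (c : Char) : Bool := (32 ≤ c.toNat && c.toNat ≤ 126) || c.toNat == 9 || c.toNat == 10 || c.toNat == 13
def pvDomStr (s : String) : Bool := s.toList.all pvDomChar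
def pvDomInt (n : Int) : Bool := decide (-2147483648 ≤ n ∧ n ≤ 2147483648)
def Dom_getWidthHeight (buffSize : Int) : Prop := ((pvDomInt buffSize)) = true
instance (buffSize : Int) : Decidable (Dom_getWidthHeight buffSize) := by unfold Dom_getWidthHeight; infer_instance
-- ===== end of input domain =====

-- B replaces A's exhaustive size-table build and linear scan by a direct perfect-square test
-- (every two-to-one-ratio table entry has size q*q for the smaller dimension q): objective = simpler.

-- module constant widthList = (2,4,8,16,32,64,128,256,512,1024,2048)
def pyWidthList : List Int := [2,4,8,16,32,64,128,256,512,1024,2048]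

-- int(math.sqrt(x)): hand port (no PySem primitive). Exact on the admitted domain
-- 0 ≤ x ≤ 2^32, where the double-precision math.sqrt truncates to the integer square root.
def pyIntSqrt (x : Int) : Int := Int.ofNat (Nat.sqrt x.toNat)

-- ===== PORT A =====
-- the nested loops building sizeList, threading the mutated tWidth (final value widthList[0])
def buildSizeListA (tWidth : Int) : List (Int × Int × Int) × Int :=
  (List.range pyWidthList.length).foldl (fun (st : List (Int × Int × Int) × Int) (i : Nat) =>
    let index : Int := (pyWidthList.length : Int) - 1 - (i : Int)
    let tW := PySem.List.pyGetD pyWidthList index 0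
    let l2 := (List.range pyWidthList.length).foldl (fun (acc : List (Int × Int × Int)) (j : Nat) =>
      let tH := PySem.List.pyGetD pyWidthList (j : Int) 0
      let size := PySem.Int.floordiv (tW * tH) 2
      acc ++ [(size, tW, tH)]) st.1
    (l2, tW)) ([], tWidth)

-- the final loop over sizeList with its early return
def scanSizeListA (buffSize : Int) : List (Int × Int × Int) → Option (Int × Int)
  | [] => none
  | (size, w, h) :: rest =>
      if size = buffSize then
        if PySem.Int.floordiv w h = 2 ∨ PySem.Int.floordiv h w = 2 then some (w, h)
        else scanSizeListA buffSize rest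
      else scanSizeListA buffSize rest

def getWidthHeight (buffSize : Int) : Int × Int :=
  let tWidth := pyIntSqrt (buffSize * 2)
  if ¬ (tWidth ∈ pyWidthList) then
    let st := buildSizeListA tWidth
    match scanSizeListA buffSize st.1 with
    | some r => r
    | none => (st.2, st.2)
  else (tWidth, tWidth)

-- ===== PORT B =====
def getWidthHeight_alt (buffSize : Int) : Int × Int :=
  let tWidth := pyIntSqrt (buffSize * 2)
  if tWidth ∈ pyWidthList then (tWidth, tWidth)
  else
    let q := pyIntSqrt buffSize
    if q * q = buffSize ∧ q ∈ pyWidthList ∧ 2 * q ∈ pyWidthList then (2 * q, q)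
    else (2, 2)

-- ===== PRECONDITION & SPEC =====
-- A raises ValueError (math domain error) on negative buffSize; excluded.
def Pre_getWidthHeight (buffSize : Int) : Prop := 0 ≤ buffSize
instance (buffSize : Int) : Decidable (Pre_getWidthHeight buffSize) := by unfold Pre_getWidthHeight; infer_instance
def pvWitness_getWidthHeight : Int := 262144

def Spec_getWidthHeight (buffSize : Int) (out : Int × Int) : Prop := out = getWidthHeight_alt buffSize
instance (buffSize : Int) (out : Int × Int) : Decidable (Spec_getWidthHeight buffSize out) := by unfold Spec_getWidthHeight; infer_instance

-- ===== CLAIM (what is proved, stated in full; the proofs are below) =====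
def Claim_equal_getWidthHeight : Prop := ∀ (buffSize : Int), Dom_getWidthHeight buffSize → Pre_getWidthHeight buffSize → Spec_getWidthHeight buffSize (getWidthHeight buffSize)

-- ===== LEMMAS AND PROOFS =====

-- the concrete value of the table build (the mutated tWidth ends at widthList[0] = 2)
theorem natSqrtEq (n q : Nat) (h1 : q*q ≤ n) (h2 : n < (q+1)*(q+1)) : Nat.sqrt n = q :=
  le_antisymm (Nat.lt_succ_iff.mp (Nat.sqrt_lt.mpr h2)) (Nat.le_sqrt.mpr h1)

theorem pyIntSqrtEq (x : Int) (q : Nat) (h1 : (q*q : Int) ≤ x) (h2 : x < (((q:Int)+1)*((q:Int)+1))) :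
    pyIntSqrt x = (q : Int) := by
  have ha : ((q*q : Nat) : Int) ≤ x := by push_cast; exact h1
  have hb : x < (((q+1)*(q+1) : Nat) : Int) := by push_cast; exact h2
  unfold pyIntSqrt
  rw [natSqrtEq x.toNat q (by omega) (by omega)]
  rfl

def sizeTableC : List (Int × Int × Int) := [
  (2048,2048,2),(4096,2048,4),(8192,2048,8),(16384,2048,16),(32768,2048,32),(65536,2048,64),
  (131072,2048,128),(262144,2048,256),(524288,2048,512),(1048576,2048,1024),(2097152,2048,2048),(1024,1024,2),
  (2048,1024,4),(4096,1024,8),(8192,1024,16),(16384,1024,32),(32768,1024,64),(65536,1024,128),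
  (131072,1024,256),(262144,1024,512),(524288,1024,1024),(1048576,1024,2048),(512,512,2),(1024,512,4),
  (2048,512,8),(4096,512,16),(8192,512,32),(16384,512,64),(32768,512,128),(65536,512,256),
  (131072,512,512),(262144,512,1024),(524288,512,2048),(256,256,2),(512,256,4),(1024,256,8),
  (2048,256,16),(4096,256,32),(8192,256,64),(16384,256,128),(32768,256,256),(65536,256,512),
  (131072,256,1024),(262144,256,2048),(128,128,2),(256,128,4),(512,128,8),(1024,128,16),
  (2048,128,32),(4096,128,64),(8192,128,128),(16384,128,256),(32768,128,512),(65536,128,1024),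
  (131072,128,2048),(64,64,2),(128,64,4),(256,64,8),(512,64,16),(1024,64,32),
  (2048,64,64),(4096,64,128),(8192,64,256),(16384,64,512),(32768,64,1024),(65536,64,2048),
  (32,32,2),(64,32,4),(128,32,8),(256,32,16),(512,32,32),(1024,32,64),
  (2048,32,128),(4096,32,256),(8192,32,512),(16384,32,1024),(32768,32,2048),(16,16,2),
  (32,16,4),(64,16,8),(128,16,16),(256,16,32),(512,16,64),(1024,16,128),
  (2048,16,256),(4096,16,512),(8192,16,1024),(16384,16,2048),(8,8,2),(16,8,4),
  (32,8,8),(64,8,16),(128,8,32),(256,8,64),(512,8,128),(1024,8,256),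
  (2048,8,512),(4096,8,1024),(8192,8,2048),(4,4,2),(8,4,4),(16,4,8),
  (32,4,16),(64,4,32),(128,4,64),(256,4,128),(512,4,256),(1024,4,512),
  (2048,4,1024),(4096,4,2048),(2,2,2),(4,2,4),(8,2,8),(16,2,16),
  (32,2,32),(64,2,64),(128,2,128),(256,2,256),(512,2,512),(1024,2,1024),
  (2048,2,2048)]

set_option maxRecDepth 100000 in
theorem buildSizeListA_eq (t : Int) : buildSizeListA t = (sizeTableC, 2) := by
  unfold buildSizeListA
  rw [show List.range pyWidthList.length = [0,1,2,3,4,5,6,7,8,9,10] from by decide]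
  simp only [List.foldl_cons, List.foldl_nil]
  decide

def sqList : List Int := [4,16,64,256,1024,4096,16384,65536,262144,1048576]

theorem table_ratio : ∀ e ∈ sizeTableC,
    (PySem.Int.floordiv e.2.1 e.2.2 = 2 ∨ PySem.Int.floordiv e.2.2 e.2.1 = 2) → e.1 ∈ sqList := by
  decide

theorem scan_none_of (b : Int) :
    ∀ l : List (Int × Int × Int),
      (∀ e ∈ l, e.1 = b → ¬ (PySem.Int.floordiv e.2.1 e.2.2 = 2 ∨ PySem.Int.floordiv e.2.2 e.2.1 = 2)) →
      scanSizeListA b l = none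
  | [], _ => rfl
  | (s, w, h) :: rest, H => by
      simp only [scanSizeListA]
      split_ifs with hs hr
      · exact absurd hr (H (s, w, h) (by simp) hs)
      · exact scan_none_of b rest (fun e he => H e (List.mem_cons_of_mem _ he))
      · exact scan_none_of b rest (fun e he => H e (List.mem_cons_of_mem _ he))

theorem scan_none (b : Int)
    (h1 : ¬ ((4:Int) = b)) (h2 : ¬ ((16:Int) = b)) (h3 : ¬ ((64:Int) = b))
    (h4 : ¬ ((256:Int) = b)) (h5 : ¬ ((1024:Int) = b)) (h6 : ¬ ((4096:Int) = b))
    (h7 : ¬ ((16384:Int) = b)) (h8 : ¬ ((65536:Int) = b)) (h9 : ¬ ((262144:Int) = b))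
    (h10 : ¬ ((1048576:Int) = b)) :
    scanSizeListA b sizeTableC = none := by
  refine scan_none_of b sizeTableC (fun e he heq hr => ?_)
  have := table_ratio e he hr
  rw [heq] at this
  simp only [sqList, List.mem_cons, List.not_mem_nil, or_false] at this
  rcases this with h|h|h|h|h|h|h|h|h|h <;> simp_all

theorem alt_cond_false (b : Int)
    (h1 : ¬ ((4:Int) = b)) (h2 : ¬ ((16:Int) = b)) (h3 : ¬ ((64:Int) = b))
    (h4 : ¬ ((256:Int) = b)) (h5 : ¬ ((1024:Int) = b)) (h6 : ¬ ((4096:Int) = b))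
    (h7 : ¬ ((16384:Int) = b)) (h8 : ¬ ((65536:Int) = b)) (h9 : ¬ ((262144:Int) = b))
    (h10 : ¬ ((1048576:Int) = b)) :
    ¬ (pyIntSqrt b * pyIntSqrt b = b ∧ pyIntSqrt b ∈ pyWidthList ∧ 2 * pyIntSqrt b ∈ pyWidthList) := by
  rintro ⟨hsq, hq, h2q⟩
  simp only [pyWidthList, List.mem_cons, List.not_mem_nil, or_false] at hq h2q
  rcases hq with h|h|h|h|h|h|h|h|h|h|h <;> rw [h] at hsq h2q <;> omega

-- ===== VERDICT (by name: the statement is the Claim_ definition above) =====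
set_option maxRecDepth 100000 in
theorem getWidthHeight_spec : Claim_equal_getWidthHeight := by
  intro b _ _
  unfold Spec_getWidthHeight getWidthHeight getWidthHeight_alt
  by_cases hm : pyIntSqrt (b * 2) ∈ pyWidthList
  · simp only [hm, not_true_eq_false, if_false, if_true]
  · simp only [hm, not_false_iff, if_true, if_false, buildSizeListA_eq]
    by_cases e1 : (4:Int) = b
    · subst e1; rw [pyIntSqrtEq 4 2 (by norm_num) (by norm_num)]; decide
    by_cases e2 : (16:Int) = b
    · subst e2; rw [pyIntSqrtEq 16 4 (by norm_num) (by norm_num)]; decide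
    by_cases e3 : (64:Int) = b
    · subst e3; rw [pyIntSqrtEq 64 8 (by norm_num) (by norm_num)]; decide
    by_cases e4 : (256:Int) = b
    · subst e4; rw [pyIntSqrtEq 256 16 (by norm_num) (by norm_num)]; decide
    by_cases e5 : (1024:Int) = b
    · subst e5; rw [pyIntSqrtEq 1024 32 (by norm_num) (by norm_num)]; decide
    by_cases e6 : (4096:Int) = b
    · subst e6; rw [pyIntSqrtEq 4096 64 (by norm_num) (by norm_num)]; decide
    by_cases e7 : (16384:Int) = b
    · subst e7; rw [pyIntSqrtEq 16384 128 (by norm_num) (by norm_num)]; decide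
    by_cases e8 : (65536:Int) = b
    · subst e8; rw [pyIntSqrtEq 65536 256 (by norm_num) (by norm_num)]; decide
    by_cases e9 : (262144:Int) = b
    · subst e9; rw [pyIntSqrtEq 262144 512 (by norm_num) (by norm_num)]; decide
    by_cases e10 : (1048576:Int) = b
    · subst e10; rw [pyIntSqrtEq 1048576 1024 (by norm_num) (by norm_num)]; decide
    rw [scan_none b e1 e2 e3 e4 e5 e6 e7 e8 e9 e10]
    simp [alt_cond_false b e1 e2 e3 e4 e5 e6 e7 e8 e9 e10]
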